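-- pv_equiv track=rewrite | github.com/sanjnaaa25/failureiq-openenv | failureiq/env.py | _rank_logs
-- ===== SOURCE A (Python) =====
-- from typing import Dict, Optional, Tuple, List
--
-- def _rank_logs(log_text: str, top_k: int) -> List[str]:
--     lines = [line for line in log_text.splitlines() if line.strip()]
--     scored = []
--     for line in lines:
--         score = 0
--         lowered = line.lower()
--         if "caused by" in lowered:
--             score += 3
--         if "error" in lowered:
--             score += 2
--         if "exception" in lowered:
--             score += 2
--         if "outofmemory" in lowered or "nullpointer" in lowered or "psql" in lowered:
--             score += 2
--         scored.append((score, line))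
--     scored.sort(key=lambda item: item[0], reverse=True)
--     return [line for _, line in scored[: max(1, min(top_k, len(scored)))]]
-- ===== SOURCE B (Python) =====
-- from typing import List
--
-- def _score(lowered: str) -> int:
--     score = 0
--     if "caused by" in lowered:
--         score += 3
--     if "error" in lowered:
--         score += 2
--     if "exception" in lowered:
--         score += 2
--     if "outofmemory" in lowered or "nullpointer" in lowered or "psql" in lowered:
--         score += 2
--     return score
--
-- def _rank_logs(log_text: str, top_k: int) -> List[str]:
--     # Bucket (counting) sort: scores are bounded by 9, so distribute lines
--     # into per-score buckets and concatenate buckets from high score to low.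
--     buckets = [[] for _ in range(10)]
--     for line in log_text.splitlines():
--         if line.strip():
--             buckets[_score(line.lower())].append(line)
--     ranked = []
--     for bucket in reversed(buckets):
--         ranked.extend(bucket)
--     return ranked[: max(1, min(top_k, len(ranked)))]
-- ===== Notes on version B (the rewrite author's own statement) =====
-- stated objective: alternative
-- what changed: Replaces A's append-then-stable-reverse-sort with a bucket (counting) sort: lines are distributed into per-score buckets 0..9 in one pass and the buckets are concatenated from high score to low, preserving input order within each score.
import Mathlib
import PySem

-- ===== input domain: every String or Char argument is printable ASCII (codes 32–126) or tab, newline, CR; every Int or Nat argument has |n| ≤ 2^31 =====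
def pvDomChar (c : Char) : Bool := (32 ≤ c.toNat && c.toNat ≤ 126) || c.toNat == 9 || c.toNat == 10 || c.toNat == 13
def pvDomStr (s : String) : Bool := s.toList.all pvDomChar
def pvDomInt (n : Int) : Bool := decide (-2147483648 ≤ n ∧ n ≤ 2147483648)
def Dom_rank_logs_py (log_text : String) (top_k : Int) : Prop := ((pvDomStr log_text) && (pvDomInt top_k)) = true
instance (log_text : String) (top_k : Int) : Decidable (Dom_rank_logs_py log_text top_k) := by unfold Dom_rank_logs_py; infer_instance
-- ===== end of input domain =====

-- B replaces A's stable comparison sort by a bucket (counting) sort over the bounded score range 0..9: simpler one-pass distribution, same output.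

-- ===== PORT A =====
-- literal transliteration of _rank_logs: filter blank lines, score each line,
-- stable sort by score descending, slice to max(1, min(top_k, len)).
def rank_logs_py (log_text : String) (top_k : Int) : List String :=
  let lines := (PySem.Chars.splitlines log_text.toList).filter
    (fun l => PySem.Chars.strip l ≠ ([] : List Char))
  let scored := lines.foldl (fun acc line =>
    let lowered := PySem.Chars.lower line
    let score : Nat := 0
    let score := score + (if PySem.Chars.isIn "caused by".toList lowered then 3 else 0)
    let score := score + (if PySem.Chars.isIn "error".toList lowered then 2 else 0)
    let score := score + (if PySem.Chars.isIn "exception".toList lowered then 2 else 0)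
    let score := score + (if PySem.Chars.isIn "outofmemory".toList lowered
        || PySem.Chars.isIn "nullpointer".toList lowered
        || PySem.Chars.isIn "psql".toList lowered then 2 else 0)
    acc ++ [(score, line)]) ([] : List (Nat × List Char))
  let scoredSorted := PySem.List.sorted scored (fun p => p.1) true
  (PySem.List.slice scoredSorted none (some (max 1 (min top_k (scored.length : Int))))).map
    (fun p => String.ofList p.2)

-- ===== PORT B =====
-- helper _score of Source B
def pvScore (lowered : List Char) : Nat :=
  let score : Nat := 0
  let score := score + (if PySem.Chars.isIn "caused by".toList lowered then 3 else 0)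
  let score := score + (if PySem.Chars.isIn "error".toList lowered then 2 else 0)
  let score := score + (if PySem.Chars.isIn "exception".toList lowered then 2 else 0)
  let score := score + (if PySem.Chars.isIn "outofmemory".toList lowered
      || PySem.Chars.isIn "nullpointer".toList lowered
      || PySem.Chars.isIn "psql".toList lowered then 2 else 0)
  score

-- bucket sort: distribute non-blank lines into buckets 0..9 by score, then
-- concatenate the buckets from high score to low and slice.
def rank_logs_py_alt (log_text : String) (top_k : Int) : List String :=
  let buckets : List (List (List Char)) := List.replicate 10 []
  let buckets := (PySem.Chars.splitlines log_text.toList).foldl (fun bs line =>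
      if PySem.Chars.strip line ≠ ([] : List Char) then
        let s := pvScore (PySem.Chars.lower line)
        bs.set s (bs.getD s [] ++ [line])
      else bs) buckets
  let ranked := buckets.reverse.foldl (fun acc b => acc ++ b) []
  (PySem.List.slice ranked none (some (max 1 (min top_k (ranked.length : Int))))).map String.ofList

-- ===== PRECONDITION & SPEC =====
def Spec_rank_logs_py (log_text : String) (top_k : Int) (out : List String) : Prop := out = rank_logs_py_alt log_text top_k
instance (log_text : String) (top_k : Int) (out : List String) : Decidable (Spec_rank_logs_py log_text top_k out) := by unfold Spec_rank_logs_py; infer_instance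

-- ===== CLAIM (what is proved, stated in full; the proofs are below) =====
def Claim_equal_rank_logs_py : Prop := ∀ (log_text : String) (top_k : Int), Dom_rank_logs_py log_text top_k → Spec_rank_logs_py log_text top_k (rank_logs_py log_text top_k)

-- ===== LEMMAS AND PROOFS =====

theorem pvScore_le_nine (l : List Char) : pvScore l ≤ 9 := by
  unfold pvScore; split_ifs <;> simp

theorem pv_insertBy_append (before : (Nat × List Char) → (Nat × List Char) → Bool)
    (x : Nat × List Char) (l t : List (Nat × List Char))
    (h : ∀ y ∈ l, before x y = false) :
    PySem.List.insertBy before x (l ++ t) = l ++ PySem.List.insertBy before x t := by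
  induction l with
  | nil => simp
  | cons y l ih =>
      have hy : before x y = false := h y (by simp)
      simp only [List.cons_append, PySem.List.insertBy, hy]
      simp [ih (fun z hz => h z (by simp [hz]))]

theorem pv_insertBy_all_before (before : (Nat × List Char) → (Nat × List Char) → Bool)
    (x : Nat × List Char) (t : List (Nat × List Char))
    (h : ∀ y ∈ t, before x y = true) :
    PySem.List.insertBy before x t = x :: t := by
  cases t with
  | nil => simp [PySem.List.insertBy]
  | cons y t => simp [PySem.List.insertBy, h y (by simp)]

theorem pv_flatMap_congr (ss : List Nat) (f g : Nat → List (Nat × List Char))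
    (h : ∀ s ∈ ss, f s = g s) : ss.flatMap f = ss.flatMap g := by
  induction ss with
  | nil => rfl
  | cons s ss ih =>
      simp only [List.flatMap_cons, h s (by simp), ih (fun s' hs' => h s' (by simp [hs']))]

-- inserting x into a concatenation of buckets with strictly descending scores
-- appends x at the end of its own bucket (stability of the insertion sort)
theorem pv_insert_flatMap (ss : List Nat) (f : Nat → List (Nat × List Char))
    (x : Nat × List Char) (hss : ss.Pairwise (· > ·))
    (hf : ∀ s, ∀ p ∈ f s, p.1 = s) (hx : x.1 ∈ ss) :
    PySem.List.insertBy (fun a b => decide (b.1 < a.1)) x (ss.flatMap f)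
      = ss.flatMap (fun s => f s ++ if x.1 = s then [x] else []) := by
  induction ss with
  | nil => simp at hx
  | cons s ss ih =>
      have hgt : ∀ s' ∈ ss, s' < s := by
        intro s' hs'; exact (List.pairwise_cons.mp hss).1 s' hs'
      have htail := (List.pairwise_cons.mp hss).2
      by_cases hxs : x.1 = s
      · have h1 : ∀ y ∈ f s, (fun a b => decide (b.1 < a.1)) x y = false := by
          intro y hy; simp [hf s y hy, hxs]
        have h2 : ∀ y ∈ ss.flatMap f, (fun a b => decide (b.1 < a.1)) x y = true := by
          intro y hy
          rcases List.mem_flatMap.mp hy with ⟨s', hs', hy'⟩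
          simp [hf s' y hy', hxs]
          exact hgt s' hs'
        have h3 : ∀ s' ∈ ss,
            f s' ++ (if x.1 = s' then [x] else []) = f s' := by
          intro s' hs'
          have : x.1 ≠ s' := by have := hgt s' hs'; omega
          simp [this]
        simp only [List.flatMap_cons]
        rw [pv_insertBy_append _ _ _ _ h1, pv_insertBy_all_before _ _ _ h2,
          pv_flatMap_congr ss _ f h3]
        simp [hxs]
      · have hx' : x.1 ∈ ss := by
          rcases List.mem_cons.mp hx with h | h
          · exact absurd h hxs
          · exact h
        have h1 : ∀ y ∈ f s, (fun a b => decide (b.1 < a.1)) x y = false := by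
          intro y hy
          have : x.1 < s := hgt _ hx'
          simp [hf s y hy]; omega
        simp only [List.flatMap_cons]
        rw [pv_insertBy_append _ _ _ _ h1, ih htail hx']
        simp [hxs]

-- fold of stable insertions, starting from the descending buckets of `pre`
theorem pv_foldl_ins (ys : List (Nat × List Char)) : ∀ (pre : List (Nat × List Char)),
    (∀ p ∈ ys, p.1 ≤ 9) →
    ys.foldl (fun acc x => PySem.List.insertBy (fun a b => decide (b.1 < a.1)) x acc)
        (((List.range 10).reverse).flatMap (fun s => pre.filter (fun p => p.1 = s)))
      = ((List.range 10).reverse).flatMap (fun s => (pre ++ ys).filter (fun p => p.1 = s)) := by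
  induction ys with
  | nil => intro pre _; simp
  | cons x ys ih =>
      intro pre h
      have hx9 : x.1 ≤ 9 := h x (by simp)
      have hstep : PySem.List.insertBy (fun a b => decide (b.1 < a.1)) x
          (((List.range 10).reverse).flatMap (fun s => pre.filter (fun p => p.1 = s)))
          = ((List.range 10).reverse).flatMap (fun s => (pre ++ [x]).filter (fun p => p.1 = s)) := by
        rw [pv_insert_flatMap ((List.range 10).reverse) _ x (by decide)
          (by intro s p hp; exact of_decide_eq_true (List.mem_filter.mp hp).2)
          (by simp; omega)]
        apply pv_flatMap_congr
        intro s _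
        by_cases hs : x.1 = s <;> simp [List.filter_append, hs]
      simp only [List.foldl_cons, hstep]
      have := ih (pre ++ [x]) (fun p hp => h p (by simp [hp]))
      simpa using this

-- A's stable reverse sort over scores ≤ 9 is the descending bucket concatenation
theorem pv_sorted_buckets (xs : List (Nat × List Char)) (h : ∀ p ∈ xs, p.1 ≤ 9) :
    PySem.List.sorted xs (fun p => p.1) true
      = ((List.range 10).reverse).flatMap (fun s => xs.filter (fun p => p.1 = s)) := by
  rw [PySem.List.sorted_rev_eq_foldl_insertBy]
  have := pv_foldl_ins xs [] h
  simpa using this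

-- B side: the bucket-distribution fold over the range-10 bucket list
theorem pv_set_buckets (g : Nat → List (List Char)) (x : List Char) (s0 : Nat) (h9 : s0 ≤ 9) :
    ((List.range 10).map g).set s0 (((List.range 10).map g).getD s0 [] ++ [x])
      = (List.range 10).map (fun s => g s ++ if s0 = s then [x] else []) := by
  interval_cases s0 <;> simp [List.range_succ]

theorem pv_buckets_fold (xs : List (List Char)) : ∀ (g : Nat → List (List Char)),
    xs.foldl (fun bs line =>
        if PySem.Chars.strip line ≠ ([] : List Char) then
          bs.set (pvScore (PySem.Chars.lower line))
            (bs.getD (pvScore (PySem.Chars.lower line)) [] ++ [line])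
        else bs) ((List.range 10).map g)
      = (List.range 10).map (fun s => g s ++
          ((xs.filter (fun l => PySem.Chars.strip l ≠ ([] : List Char))).filter
            (fun l => pvScore (PySem.Chars.lower l) = s))) := by
  induction xs with
  | nil => intro g; simp
  | cons x xs ih =>
      intro g
      by_cases hk : PySem.Chars.strip x ≠ ([] : List Char)
      · simp only [List.foldl_cons, if_pos hk,
          pv_set_buckets g x _ (pvScore_le_nine _), ih]
        refine List.map_congr_left ?_
        intro s _
        by_cases hs : pvScore (PySem.Chars.lower x) = s <;>
          simp [hk, hs, List.append_assoc]
      · simp only [List.foldl_cons, if_neg hk, ih]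
        simp [hk]

theorem pv_foldl_append (l : List (List (List Char))) : ∀ init : List (List Char),
    l.foldl (fun acc b => acc ++ b) init = init ++ l.flatten := by
  induction l with
  | nil => intro init; simp
  | cons b l ih => intro init; simp [ih, List.append_assoc]

-- the common closed form both ports are shown to equal
def pvCommon (log_text : String) (top_k : Int) : List String :=
  let lines := (PySem.Chars.splitlines log_text.toList).filter
    (fun l => PySem.Chars.strip l ≠ ([] : List Char))
  let ranked := ((List.range 10).reverse).flatMap
    (fun s => lines.filter (fun l => pvScore (PySem.Chars.lower l) = s))
  (ranked.take (max 1 (min top_k (lines.length : Int))).toNat).map String.ofList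

theorem pv_ranked_length (lines : List (List Char)) :
    (((List.range 10).reverse).flatMap
      (fun s => lines.filter (fun l => pvScore (PySem.Chars.lower l) = s))).length
      = lines.length := by
  have h := pv_sorted_buckets (lines.map (fun l => (pvScore (PySem.Chars.lower l), l)))
    (by intro p hp; rcases List.mem_map.mp hp with ⟨l, _, rfl⟩; exact pvScore_le_nine _)
  have hlen := PySem.List.length_sorted (lines.map (fun l => (pvScore (PySem.Chars.lower l), l)))
    (fun p => p.1) true
  rw [h] at hlen
  simp only [List.length_map] at hlen
  have hfil : ∀ s : Nat,
      (List.filter (fun p => p.1 = s) (lines.map (fun l => (pvScore (PySem.Chars.lower l), l))))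
        = (lines.filter (fun l => pvScore (PySem.Chars.lower l) = s)).map
            (fun l => (pvScore (PySem.Chars.lower l), l)) := by
    intro s; rw [List.filter_map]; rfl
  simp only [hfil] at hlen
  simpa [List.length_flatMap] using hlen

theorem pv_A_eq (log_text : String) (top_k : Int) :
    rank_logs_py log_text top_k = pvCommon log_text top_k := by
  unfold rank_logs_py pvCommon
  set lines := (PySem.Chars.splitlines log_text.toList).filter
    (fun l => PySem.Chars.strip l ≠ ([] : List Char)) with hlines
  have hscored : lines.foldl (fun acc line =>
      acc ++ [(pvScore (PySem.Chars.lower line), line)]) []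
      = lines.map (fun l => (pvScore (PySem.Chars.lower l), l)) := by
    simpa using PySem.List.foldl_append_singleton_eq_map
      (fun l => (pvScore (PySem.Chars.lower l), l)) lines []
  show (PySem.List.slice (PySem.List.sorted (lines.foldl (fun acc line =>
      acc ++ [(pvScore (PySem.Chars.lower line), line)]) []) (fun p => p.1) true) none
      (some (max 1 (min top_k ((lines.foldl (fun acc line =>
        acc ++ [(pvScore (PySem.Chars.lower line), line)]) []).length : Int))))).map
      (fun p => String.ofList p.2) = _
  rw [hscored]
  have hsorted := pv_sorted_buckets (lines.map (fun l => (pvScore (PySem.Chars.lower l), l)))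
    (by intro p hp; rcases List.mem_map.mp hp with ⟨l, _, rfl⟩; exact pvScore_le_nine _)
  rw [hsorted]
  have hfil : ∀ s : Nat,
      (List.filter (fun p => p.1 = s) (lines.map (fun l => (pvScore (PySem.Chars.lower l), l))))
        = (lines.filter (fun l => pvScore (PySem.Chars.lower l) = s)).map
            (fun l => (pvScore (PySem.Chars.lower l), l)) := by
    intro s; rw [List.filter_map]; rfl
  simp only [hfil]
  have hmapflat : (((List.range 10).reverse).flatMap (fun s =>
      (lines.filter (fun l => pvScore (PySem.Chars.lower l) = s)).map
        (fun l => (pvScore (PySem.Chars.lower l), l))))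
      = (((List.range 10).reverse).flatMap (fun s =>
          lines.filter (fun l => pvScore (PySem.Chars.lower l) = s))).map
        (fun l => (pvScore (PySem.Chars.lower l), l)) := by
    rw [List.map_flatMap]
  rw [hmapflat]
  have hn : (0 : Int) ≤ max 1 (min top_k (lines.length : Int)) := by
    have := le_max_left (1 : Int) (min top_k (lines.length : Int)); omega
  rw [PySem.List.slice_to _ (by simp [hn])]
  rw [List.length_map, ← List.map_take, List.map_map]
  rfl

theorem pv_B_eq (log_text : String) (top_k : Int) :
    rank_logs_py_alt log_text top_k = pvCommon log_text top_k := by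
  change (List.map String.ofList (PySem.List.slice
      (List.foldl (fun acc b => acc ++ b) []
        (List.foldl (fun bs line =>
            if PySem.Chars.strip line ≠ ([] : List Char) then
              bs.set (pvScore (PySem.Chars.lower line))
                (bs.getD (pvScore (PySem.Chars.lower line)) [] ++ [line])
            else bs)
          (List.replicate 10 ([] : List (List Char)))
          (PySem.Chars.splitlines log_text.toList)).reverse)
      none (some (max 1 (min top_k ((List.foldl (fun acc b => acc ++ b) []
        (List.foldl (fun bs line =>
            if PySem.Chars.strip line ≠ ([] : List Char) then
              bs.set (pvScore (PySem.Chars.lower line))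
                (bs.getD (pvScore (PySem.Chars.lower line)) [] ++ [line])
            else bs)
          (List.replicate 10 ([] : List (List Char)))
          (PySem.Chars.splitlines log_text.toList)).reverse).length : Int))))))
    = List.map String.ofList
        (((((List.range 10).reverse).flatMap (fun s =>
            ((PySem.Chars.splitlines log_text.toList).filter
              (fun l => PySem.Chars.strip l ≠ ([] : List Char))).filter
              (fun l => pvScore (PySem.Chars.lower l) = s))).take
          (max 1 (min top_k ((((PySem.Chars.splitlines log_text.toList).filter
            (fun l => PySem.Chars.strip l ≠ ([] : List Char))).length : Int)))).toNat))
  have hinit : (List.replicate 10 ([] : List (List Char)))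
      = (List.range 10).map (fun _ => ([] : List (List Char))) := by
    simp [List.map_const']
  rw [hinit]
  have hfold := pv_buckets_fold (PySem.Chars.splitlines log_text.toList)
    (fun _ => ([] : List (List Char)))
  simp only [List.nil_append] at hfold
  rw [hfold]
  set lines := (PySem.Chars.splitlines log_text.toList).filter
    (fun l => PySem.Chars.strip l ≠ ([] : List Char)) with hlines
  rw [pv_foldl_append, List.nil_append]
  have hflat : ((List.range 10).map (fun s =>
      lines.filter (fun l => pvScore (PySem.Chars.lower l) = s))).reverse.flatten
      = ((List.range 10).reverse).flatMap
          (fun s => lines.filter (fun l => pvScore (PySem.Chars.lower l) = s)) := by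
    rw [← List.map_reverse, List.flatMap_def]
  rw [hflat, pv_ranked_length lines]
  have hn : (0 : Int) ≤ max 1 (min top_k (lines.length : Int)) := by
    have := le_max_left (1 : Int) (min top_k (lines.length : Int)); omega
  rw [PySem.List.slice_to _ (by simp [hn])]

-- ===== VERDICT (by name: the statement is the Claim_ definition above) =====
theorem rank_logs_py_spec : Claim_equal_rank_logs_py := by
  intro log_text top_k _
  unfold Spec_rank_logs_py
  rw [pv_A_eq, pv_B_eq]
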